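-- pv_equiv track=rewrite | github.com/ostayamaynard/OTA_zoho_crm | tools/generators/generate_ai_kb.py | classify_modules
-- ===== SOURCE A (Python) =====
-- from typing import Dict, List, Optional, Tuple
--
-- TIER1_MODULES = {
--     "Leads", "Contacts", "Accounts", "Deals", "Courses",
--     "Registration_Records", "Invoices", "Quotes"
-- }
--
-- EXCLUDED_PREFIXES = ("zohosign__", "clicksendext__")
--
-- EXCLUDED_SUFFIXES = ("_Insights__s",)
--
-- def is_excluded_module(module_name: str) -> bool:
--     """Check if module should be excluded from documentation."""
--     if module_name.startswith(EXCLUDED_PREFIXES):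
--         return True
--     if module_name.endswith(EXCLUDED_SUFFIXES):
--         return True
--     return False
--
-- def classify_modules(data_model: dict) -> Tuple[List[str], List[str], List[str]]:
--     """
--     Returns (tier1, tier2, excluded) module lists.
--
--     Tier1: Always-include list + top modules by activity
--     Tier2: Remaining non-excluded modules
--     Excluded: Prefix/suffix matches
--     """
--     modules_metadata = data_model.get("modules", {})
--
--     tier1 = []
--     tier2 = []
--     excluded = []
--
--     # Calculate activity score for auto-detection
--     activity_scores = []
--     for module_name, module_data in modules_metadata.items():
--         if is_excluded_module(module_name):
--             excluded.append(module_name)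
--             continue
--
--         field_count = module_data.get("field_count", 0)
--         workflow_count = module_data.get("workflow_count", 0)
--         score = field_count + (workflow_count * 5)  # Weight workflows higher
--         activity_scores.append((module_name, score))
--
--     # Sort by activity score
--     activity_scores.sort(key=lambda x: x[1], reverse=True)
--
--     # Build tier1: forced includes + high activity modules
--     for module_name, score in activity_scores:
--         if module_name in TIER1_MODULES or score > 50:  # Threshold for auto-inclusion
--             tier1.append(module_name)
--         else:
--             tier2.append(module_name)
--
--     # Ensure all forced tier1 modules are included
--     for module in TIER1_MODULES:
--         if module not in tier1 and module in modules_metadata: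
--             tier1.append(module)
--             if module in tier2:
--                 tier2.remove(module)
--
--     return sorted(tier1), sorted(tier2), sorted(excluded)
-- ===== SOURCE B (Python) =====
-- from typing import Dict, List, Optional, Tuple
--
-- TIER1_MODULES = {
--     "Leads", "Contacts", "Accounts", "Deals", "Courses",
--     "Registration_Records", "Invoices", "Quotes"
-- }
--
-- EXCLUDED_PREFIXES = ("zohosign__", "clicksendext__")
--
-- EXCLUDED_SUFFIXES = ("_Insights__s",)
--
-- def is_excluded_module(module_name: str) -> bool:
--     if module_name.startswith(EXCLUDED_PREFIXES):
--         return True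
--     if module_name.endswith(EXCLUDED_SUFFIXES):
--         return True
--     return False
--
-- def classify_modules(data_model: dict) -> Tuple[List[str], List[str], List[str]]:
--     """Single pass: classify each module directly; sorting the outputs makes the
--     intermediate activity-score sort and the TIER1 fixup loop unnecessary."""
--     tier1, tier2, excluded = [], [], []
--     for name, md in data_model.get("modules", {}).items():
--         if is_excluded_module(name):
--             excluded.append(name)
--         elif name in TIER1_MODULES or md.get("field_count", 0) + md.get("workflow_count", 0) * 5 > 50:
--             tier1.append(name)
--         else:
--             tier2.append(name)
--     return sorted(tier1), sorted(tier2), sorted(excluded)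
-- ===== Notes on version B (the rewrite author's own statement) =====
-- stated objective: simpler
-- what changed: B classifies each module in a single pass over modules_metadata instead of A's score-list pass + reverse sort + partition pass + TIER1 fixup loop; the sort and the fixup loop are provably irrelevant because the three result lists are sorted at the end and every TIER1 module present and non-excluded already lands in tier1.
import Mathlib
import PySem

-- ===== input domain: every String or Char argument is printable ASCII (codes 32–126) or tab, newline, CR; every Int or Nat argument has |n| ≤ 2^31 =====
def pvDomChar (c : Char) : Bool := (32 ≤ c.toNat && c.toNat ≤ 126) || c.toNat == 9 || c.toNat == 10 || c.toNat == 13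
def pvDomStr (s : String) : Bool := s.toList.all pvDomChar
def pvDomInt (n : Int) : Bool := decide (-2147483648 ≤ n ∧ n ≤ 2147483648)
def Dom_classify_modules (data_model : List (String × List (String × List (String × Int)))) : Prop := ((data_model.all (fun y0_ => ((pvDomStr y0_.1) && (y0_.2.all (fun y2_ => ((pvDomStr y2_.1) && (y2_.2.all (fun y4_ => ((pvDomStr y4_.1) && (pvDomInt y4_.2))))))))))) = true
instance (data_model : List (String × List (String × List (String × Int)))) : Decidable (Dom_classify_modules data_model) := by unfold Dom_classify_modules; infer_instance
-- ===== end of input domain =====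

-- B fuses A's score/partition passes into one classifying pass and drops the
-- intermediate activity-score sort and the (dead) TIER1 fixup loop (objective: simpler).

-- ===== PORT A =====
def TIER1_MODULES : List String :=
  ["Leads", "Contacts", "Accounts", "Deals", "Courses",
   "Registration_Records", "Invoices", "Quotes"]

def EXCLUDED_PREFIXES : List String := ["zohosign__", "clicksendext__"]

def EXCLUDED_SUFFIXES : List String := ["_Insights__s"]

def is_excluded_module (module_name : String) : Bool :=
  if EXCLUDED_PREFIXES.any (fun p => PySem.Str.startswith module_name p) then true
  else if EXCLUDED_SUFFIXES.any (fun s => PySem.Str.endswith module_name s) then true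
  else false

-- loop 1 of A: split into excluded names and (name, score) pairs
def pvStepScore (st : List String × List (String × Int)) (p : String × List (String × Int)) :
    List String × List (String × Int) :=
  if is_excluded_module p.1 then (st.1 ++ [p.1], st.2)
  else
    let field_count := (p.2.lookup "field_count").getD 0
    let workflow_count := (p.2.lookup "workflow_count").getD 0
    (st.1, st.2 ++ [(p.1, field_count + workflow_count * 5)])

-- loop 2 of A: split scored modules into tier1 / tier2
def pvStepTier (st : List String × List String) (x : String × Int) :
    List String × List String :=
  if TIER1_MODULES.contains x.1 || x.2 > 50 then (st.1 ++ [x.1], st.2)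
  else (st.1, st.2 ++ [x.1])

-- loop 3 of A: the forced-tier1 fixup (tier2.remove(m) is guarded by membership,
-- so remove? always returns some there; .getD st.2 is unreachable)
def pvStepFix (modules : List (String × List (String × Int)))
    (st : List String × List String) (m : String) : List String × List String :=
  if !st.1.contains m && modules.any (fun p => p.1 == m) then
    (st.1 ++ [m],
     if st.2.contains m then (PySem.List.remove? st.2 m).getD st.2 else st.2)
  else st

def classify_modules (data_model : List (String × List (String × List (String × Int)))) :
    List String × List String × List String :=
  let modules := (data_model.lookup "modules").getD []
  let st1 := modules.foldl pvStepScore ([], [])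
  let excluded := st1.1
  let activity_scores := PySem.List.sorted st1.2 (fun x => x.2) true
  let st2 := activity_scores.foldl pvStepTier ([], [])
  let st3 := TIER1_MODULES.foldl (pvStepFix modules) st2
  (PySem.List.sorted st3.1 (fun x => x) false,
   PySem.List.sorted st3.2 (fun x => x) false,
   PySem.List.sorted excluded (fun x => x) false)

-- ===== PORT B =====
-- single classifying pass of B
def pvStepB (st : List String × List String × List String)
    (p : String × List (String × Int)) : List String × List String × List String :=
  if is_excluded_module p.1 then (st.1, st.2.1, st.2.2 ++ [p.1])
  else if TIER1_MODULES.contains p.1 ||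
          (p.2.lookup "field_count").getD 0 + (p.2.lookup "workflow_count").getD 0 * 5 > 50 then
    (st.1 ++ [p.1], st.2.1, st.2.2)
  else (st.1, st.2.1 ++ [p.1], st.2.2)

def classify_modules_alt (data_model : List (String × List (String × List (String × Int)))) :
    List String × List String × List String :=
  let st := ((data_model.lookup "modules").getD []).foldl pvStepB ([], [], [])
  (PySem.List.sorted st.1 (fun x => x) false,
   PySem.List.sorted st.2.1 (fun x => x) false,
   PySem.List.sorted st.2.2 (fun x => x) false)

-- ===== PRECONDITION & SPEC =====
def Spec_classify_modules (data_model : List (String × List (String × List (String × Int)))) (out : List String × List String × List String) : Prop := out = classify_modules_alt data_model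
instance (data_model : List (String × List (String × List (String × Int)))) (out : List String × List String × List String) : Decidable (Spec_classify_modules data_model out) := by unfold Spec_classify_modules; infer_instance

-- ===== CLAIM (what is proved, stated in full; the proofs are below) =====
def Claim_equal_classify_modules : Prop := ∀ (data_model : List (String × List (String × List (String × Int)))), Dom_classify_modules data_model → Spec_classify_modules data_model (classify_modules data_model)

-- ===== LEMMAS AND PROOFS =====

-- the (name, score) pair A builds for a non-excluded module
def pvScored (p : String × List (String × Int)) : String × Int :=
  (p.1, (p.2.lookup "field_count").getD 0 + (p.2.lookup "workflow_count").getD 0 * 5)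

-- A's tier1 test on a scored pair
def pvPred (x : String × Int) : Bool := TIER1_MODULES.contains x.1 || x.2 > 50

lemma loop1_spec (l : List (String × List (String × Int))) (ex : List String)
    (sc : List (String × Int)) :
    l.foldl pvStepScore (ex, sc) =
      (ex ++ (l.filter (fun p => is_excluded_module p.1)).map (·.1),
       sc ++ (l.filter (fun p => !is_excluded_module p.1)).map pvScored) := by
  induction l generalizing ex sc with
  | nil => simp
  | cons p l ih =>
    by_cases h : is_excluded_module p.1
    · simp [pvStepScore, h, ih, List.append_assoc]
    · simp [pvStepScore, h, ih, pvScored, List.append_assoc]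

lemma loop2_spec (xs : List (String × Int)) (t1 t2 : List String) :
    xs.foldl pvStepTier (t1, t2) =
      (t1 ++ (xs.filter pvPred).map (·.1),
       t2 ++ (xs.filter (fun x => !pvPred x)).map (·.1)) := by
  induction xs generalizing t1 t2 with
  | nil => simp
  | cons x xs ih =>
    have hstep : ∀ st : List String × List String, pvStepTier st x =
        if pvPred x then (st.1 ++ [x.1], st.2) else (st.1, st.2 ++ [x.1]) := fun _ => rfl
    rw [List.foldl_cons, hstep]
    by_cases h : pvPred x = true
    · rw [if_pos h, ih]; simp [h]
    · rw [if_neg h, ih]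
      simp only [Bool.not_eq_true] at h
      simp [h]

lemma loop3_noop (modules : List (String × List (String × Int))) (L : List String)
    (t1 t2 : List String)
    (h : ∀ m ∈ L, modules.any (fun p => p.1 == m) = true → t1.contains m = true) :
    L.foldl (pvStepFix modules) (t1, t2) = (t1, t2) := by
  induction L with
  | nil => rfl
  | cons m L ih =>
    have hstep : pvStepFix modules (t1, t2) m = (t1, t2) := by
      unfold pvStepFix
      by_cases hk : modules.any (fun p => p.1 == m) = true
      · have hmem : m ∈ t1 := by simpa using h m List.mem_cons_self hk
        simp [hmem]
      · simp [hk]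
    rw [List.foldl_cons, hstep]
    exact ih (fun m' hm' => h m' (List.mem_cons_of_mem _ hm'))

lemma tier1_not_excluded : ∀ m ∈ TIER1_MODULES, is_excluded_module m = false := by decide

lemma loopB_spec (l : List (String × List (String × Int)))
    (a b c : List String) :
    l.foldl pvStepB (a, b, c) =
      (a ++ (l.filter (fun p => !is_excluded_module p.1 && pvPred (pvScored p))).map (·.1),
       b ++ (l.filter (fun p => !is_excluded_module p.1 && !pvPred (pvScored p))).map (·.1),
       c ++ (l.filter (fun p => is_excluded_module p.1)).map (·.1)) := by
  induction l generalizing a b c with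
  | nil => simp
  | cons p l ih =>
    have hstep : ∀ st : List String × List String × List String, pvStepB st p =
        if is_excluded_module p.1 then (st.1, st.2.1, st.2.2 ++ [p.1])
        else if pvPred (pvScored p) then (st.1 ++ [p.1], st.2.1, st.2.2)
        else (st.1, st.2.1 ++ [p.1], st.2.2) := fun _ => rfl
    rw [List.foldl_cons, hstep]
    by_cases h : is_excluded_module p.1 = true
    · rw [if_pos h, ih]; simp [h]
    · rw [if_neg h]
      by_cases h2 : pvPred (pvScored p) = true
      · rw [if_pos h2, ih]
        simp only [Bool.not_eq_true] at h
        simp [h, h2]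
      · rw [if_neg h2, ih]
        simp only [Bool.not_eq_true] at h h2
        simp [h, h2]

-- the filtered/mapped lists A sorts are rearrangements of the ones B sorts
lemma perm_side (l : List (String × List (String × Int))) (q : (String × Int) → Bool) :
    (((PySem.List.sorted ((l.filter (fun p => !is_excluded_module p.1)).map pvScored)
        (fun x => x.2) true).filter q).map (·.1)).Perm
      ((l.filter (fun p => !is_excluded_module p.1 && q (pvScored p))).map (·.1)) := by
  have h1 : (PySem.List.sorted ((l.filter (fun p => !is_excluded_module p.1)).map pvScored)
      (fun x => x.2) true).Perm ((l.filter (fun p => !is_excluded_module p.1)).map pvScored) :=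
    PySem.List.sorted_perm _ _ _
  have h2 := (h1.filter q).map (·.1)
  refine h2.trans ?_
  have hf : ((fun x : String × Int => x.1) ∘ pvScored)
      = (fun p : String × List (String × Int) => p.1) := by
    funext p; rfl
  have hg : (fun a : String × List (String × Int) => (q ∘ pvScored) a && !is_excluded_module a.1)
      = (fun p : String × List (String × Int) => !is_excluded_module p.1 && q (pvScored p)) := by
    funext p; simp [Function.comp_apply, Bool.and_comm]
  rw [List.filter_map, List.map_map, List.filter_filter, hf, hg]

lemma string_id_injective : Function.Injective (fun x : String => x) := fun _ _ h => h

-- ===== VERDICT (by name: the statement is the Claim_ definition above) =====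
theorem classify_modules_spec : Claim_equal_classify_modules := by
  intro data_model _
  unfold Spec_classify_modules classify_modules classify_modules_alt
  set l := (data_model.lookup "modules").getD [] with hl
  simp only [loop1_spec, loopB_spec, List.nil_append]
  set xs := PySem.List.sorted ((l.filter (fun p => !is_excluded_module p.1)).map pvScored)
      (fun x => x.2) true with hxs
  simp only [loop2_spec, List.nil_append]
  -- the fixup loop is a no-op: every TIER1 module present in `modules` is already in tier1
  rw [loop3_noop l TIER1_MODULES _ _ ?hfix]
  case hfix =>
    intro m hm hk
    rw [List.any_eq_true] at hk
    obtain ⟨p, hp, hpm⟩ := hk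
    rw [beq_iff_eq] at hpm
    have hnex : is_excluded_module p.1 = false := by
      rw [hpm]; exact tier1_not_excluded m hm
    have hmem : pvScored p ∈ xs := by
      rw [hxs, PySem.List.mem_sorted]
      exact List.mem_map_of_mem (List.mem_filter.mpr ⟨hp, by simp [hnex]⟩)
    have hpred : pvPred (pvScored p) = true := by
      simp [pvPred, pvScored, hpm]
      exact Or.inl hm
    have : m ∈ (xs.filter pvPred).map (·.1) := by
      refine List.mem_map.mpr ⟨pvScored p, List.mem_filter.mpr ⟨hmem, hpred⟩, ?_⟩
      simp [pvScored, hpm]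
    exact List.contains_iff_mem.mpr this
  refine Prod.ext ?_ (Prod.ext ?_ rfl)
  · exact PySem.List.sorted_eq_sorted_of_perm _ _ _ string_id_injective (perm_side l pvPred)
  · exact PySem.List.sorted_eq_sorted_of_perm _ _ _ string_id_injective
      (perm_side l (fun x => !pvPred x))
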